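-- pv_equiv track=rewrite | github.com/aorursy/new-nb-1 | akila29_fork-of-paper3-1d6401.py | accuracyVerification
-- ===== SOURCE A (Python) =====
-- def accuracyVerification(result,actual):
--
--     finalResult={}
--
--     finalResultList=[]
--
--
--
--     actual=list(actual[0])
--
--
--
--     for prop in result:
--
--         for index,data in enumerate(prop):
--
--             if(finalResult.get(index,False)):
--
--                 finalResult[index]+=data
--
--             else:
--
--                 finalResult[index]=data
--
--
--
--     for index,key in enumerate(finalResult):
--
--         if finalResult[key]>4:
--
--             finalResultList.append(str(actual[index])+",1")
--
--         else:
--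
--             finalResultList.append(str(actual[index])+",0")
--
--
--
--     return finalResultList
-- ===== SOURCE B (Python) =====
-- def accuracyVerification(result, actual):
--     actual0 = list(actual[0])
--     m = max(map(len, result), default=0)
--     return [str(actual0[i]) + (",1" if sum(row[i] for row in result if i < len(row)) > 4 else ",0")
--             for i in range(m)]
-- ===== Notes on version B (the rewrite author's own statement) =====
-- stated objective: simpler
-- what changed: Replaces A's dict-accumulator nested loop plus a second enumerate-the-dict pass by a direct per-column computation: take the max row length and, for each column index, sum that column in one comprehension.
import Mathlib
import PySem

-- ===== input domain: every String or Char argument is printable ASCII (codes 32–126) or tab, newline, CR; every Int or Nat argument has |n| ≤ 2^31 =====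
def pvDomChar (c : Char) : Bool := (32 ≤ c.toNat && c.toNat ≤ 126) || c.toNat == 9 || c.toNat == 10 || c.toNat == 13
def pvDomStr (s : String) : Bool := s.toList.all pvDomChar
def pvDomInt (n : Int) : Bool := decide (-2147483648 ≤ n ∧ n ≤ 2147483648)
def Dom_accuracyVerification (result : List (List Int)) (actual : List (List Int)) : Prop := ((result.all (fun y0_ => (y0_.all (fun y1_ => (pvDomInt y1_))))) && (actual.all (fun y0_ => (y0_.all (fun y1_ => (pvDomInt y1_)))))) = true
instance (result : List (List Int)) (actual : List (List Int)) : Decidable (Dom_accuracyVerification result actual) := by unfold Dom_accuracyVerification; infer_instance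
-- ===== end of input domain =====

-- B replaces A's dict-accumulator nested loop by a direct per-column pass (max length, then one
-- column sum per index) — objective: simpler, same exact output.

-- ===== PORT A =====
-- actual = list(actual[0]) raises IndexError when actual == []; the second loop's actual[index]
-- raises IndexError when a row of result is longer than actual[0] — both excluded by Pre_ below
-- (there pyGetD's default is never read).
def accuracyVerification (result : List (List Int)) (actual : List (List Int)) : List String :=
  let actual0 := actual.headD []
  let finalResult : PySem.Dict Int Int :=
    result.foldl (fun d prop =>
      (PySem.List.enumerate prop 0).foldl (fun d p =>
        -- if(finalResult.get(index, False)): truthy iff key present with nonzero value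
        if d.getD p.1 0 ≠ 0 then d.insert p.1 (d.getD p.1 0 + p.2)  -- finalResult[index] += data
        else d.insert p.1 p.2)                                       -- finalResult[index] = data
        d)
      PySem.Dict.empty
  (PySem.List.enumerate finalResult.keys 0).foldl (fun acc p =>
    if finalResult.getD p.2 0 > 4 then
      acc ++ [PySem.Int.toStr (PySem.List.pyGetD actual0 p.1 0) ++ ",1"]
    else
      acc ++ [PySem.Int.toStr (PySem.List.pyGetD actual0 p.1 0) ++ ",0"]) []

-- ===== PORT B =====
def accuracyVerification_alt (result : List (List Int)) (actual : List (List Int)) : List String :=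
  let actual0 := actual.headD []
  let m := result.foldl (fun acc row => max acc row.length) 0
  (List.range m).map (fun i =>
    PySem.Int.toStr (actual0.getD i 0) ++
      (if result.foldl (fun s row => if i < row.length then s + row.getD i 0 else s) 0 > 4
       then ",1" else ",0"))

-- ===== PRECONDITION & SPEC =====
-- Pre_ excludes exactly the inputs where the Python A raises IndexError: actual == [], or some row
-- of result longer than actual[0].
def Pre_accuracyVerification (result : List (List Int)) (actual : List (List Int)) : Prop :=
  actual ≠ [] ∧ ∀ row ∈ result, row.length ≤ (actual.headD []).length
instance (result : List (List Int)) (actual : List (List Int)) : Decidable (Pre_accuracyVerification result actual) := by unfold Pre_accuracyVerification; infer_instance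

def pvWitness_accuracyVerification : List (List Int) × List (List Int) := ([[1, 2], [3]], [[5, 6]])

def Spec_accuracyVerification (result : List (List Int)) (actual : List (List Int)) (out : List String) : Prop := out = accuracyVerification_alt result actual
instance (result : List (List Int)) (actual : List (List Int)) (out : List String) : Decidable (Spec_accuracyVerification result actual out) := by unfold Spec_accuracyVerification; infer_instance

-- ===== CLAIM (what is proved, stated in full; the proofs are below) =====
def Claim_equal_accuracyVerification : Prop := ∀ (result : List (List Int)) (actual : List (List Int)), Dom_accuracyVerification result actual → Pre_accuracyVerification result actual → Spec_accuracyVerification result actual (accuracyVerification result actual)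

-- ===== LEMMAS AND PROOFS =====

-- the keys [0, 1, …, m-1] as Ints
def castRange (m : Nat) : List Int := (List.range m).map (fun k => (k : Int))

-- the column-i sum, exactly as B's port computes it
def colS (result : List (List Int)) (i : Nat) : Int :=
  result.foldl (fun s row => if i < row.length then s + row.getD i 0 else s) 0

-- A's dict-update step, and its unconditional insert form
def stepA (d : PySem.Dict Int Int) (p : Int × Int) : PySem.Dict Int Int :=
  if d.getD p.1 0 ≠ 0 then d.insert p.1 (d.getD p.1 0 + p.2) else d.insert p.1 p.2

def insA (d : PySem.Dict Int Int) (p : Int × Int) : PySem.Dict Int Int :=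
  d.insert p.1 (d.getD p.1 0 + p.2)

theorem stepA_eq (d : PySem.Dict Int Int) (p : Int × Int) : stepA d p = insA d p := by
  unfold stepA insA
  split_ifs with h
  · rfl
  · have h0 : d.getD p.1 0 = 0 := by omega
    rw [h0, zero_add]

theorem stepA_fold_eq (l : List (Int × Int)) (d : PySem.Dict Int Int) :
    l.foldl stepA d = l.foldl insA d := by
  induction l generalizing d with
  | nil => rfl
  | cons p l ih => simp [List.foldl_cons, stepA_eq, ih]

-- value of an insA-fold at a key
theorem getD_insA_fold (l : List (Int × Int)) (d : PySem.Dict Int Int) (k : Int) :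
    (l.foldl insA d).getD k 0
      = d.getD k 0 + ((l.filter (fun p => p.1 == k)).map (·.2)).sum := by
  induction l generalizing d with
  | nil => simp
  | cons p l ih =>
    rw [List.foldl_cons, ih]
    by_cases hk : p.1 = k
    · subst hk
      simp [insA, PySem.Dict.getD_insert_self]
      ring
    · have : (p.1 == k) = false := by simp [hk]
      simp only [List.filter_cons, this]
      rw [insA, PySem.Dict.getD_insert]
      simp [Ne.symm hk]

-- the values paired with key i in enumerate(prop, s)
theorem enum_filter (prop : List Int) (s i : Nat) :
    ((PySem.List.enumerate prop (s : Int)).filter (fun p => p.1 == ((i : Nat) : Int))).map (·.2)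
      = if s ≤ i ∧ i < s + prop.length then [prop.getD (i - s) 0] else [] := by
  induction prop generalizing s with
  | nil =>
    rw [PySem.List.enumerate_nil, List.filter_nil, List.map_nil,
       if_neg (by simp only [List.length_nil]; omega)]
  | cons x xs ih =>
    rw [PySem.List.enumerate_cons]
    have hcast : (s : Int) + 1 = ((s + 1 : Nat) : Int) := by push_cast; ring
    by_cases hsi : s = i
    · subst hsi
      have h1 : (((s : Nat) : Int) == ((s : Nat) : Int)) = true := by simp
      rw [List.filter_cons, h1, if_pos rfl, List.map_cons, hcast, ih]
      rw [if_neg (by omega), if_pos (by constructor <;> simp)]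
      simp
    · have h1 : (((s : Nat) : Int) == ((i : Nat) : Int)) = false := by
        simp [hsi]
      rw [List.filter_cons, h1]
      rw [if_neg (by simp), hcast, ih]
      by_cases h2 : s + 1 ≤ i ∧ i < s + 1 + xs.length
      · rw [if_pos h2, if_pos (by simp; omega)]
        have h4 : i - s = (i - (s + 1)) + 1 := by omega
        simp [h4]
      · rw [if_neg h2, if_neg (by simp; omega)]

-- shifting the accumulator of B's column-sum fold
theorem colS_shift (l : List (List Int)) (i : Nat) (a : Int) :
    l.foldl (fun s row => if i < row.length then s + row.getD i 0 else s) a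
      = a + colS l i := by
  induction l generalizing a with
  | nil => simp [colS]
  | cons row l ih =>
    rw [List.foldl_cons]
    rw [show colS (row :: l) i
          = l.foldl (fun s row => if i < row.length then s + row.getD i 0 else s)
              (if i < row.length then (0 : Int) + row.getD i 0 else 0) from rfl]
    rw [ih, ih]
    split_ifs <;> ring

-- value of A's accumulated dict at column i is B's column sum
theorem getD_dictA (result : List (List Int)) (d : PySem.Dict Int Int) (i : Nat) :
    (result.foldl (fun d prop => (PySem.List.enumerate prop 0).foldl stepA d) d).getD ((i : Nat) : Int) 0
      = d.getD ((i : Nat) : Int) 0 + colS result i := by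
  induction result generalizing d with
  | nil => simp [colS]
  | cons prop rest ih =>
    rw [List.foldl_cons, ih]
    rw [stepA_fold_eq, getD_insA_fold]
    have h0 : ((0 : Int)) = ((0 : Nat) : Int) := rfl
    rw [h0, enum_filter prop 0 i]
    rw [show colS (prop :: rest) i
          = rest.foldl (fun s row => if i < row.length then s + row.getD i 0 else s)
              (if i < prop.length then (0 : Int) + prop.getD i 0 else 0) from rfl]
    rw [colS_shift]
    by_cases hi : i < prop.length
    · rw [if_pos (by omega), if_pos hi]
      simp
      ring
    · rw [if_neg (by omega), if_neg hi]
      simp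

-- keys accumulated by A's nested loop
theorem insA_fold_keys (l : List (Int × Int)) (d : PySem.Dict Int Int) :
    (l.foldl insA d).keys = PySem.Set.update d.keys (l.map (·.1)) := by
  have h : l.foldl insA d
      = l.foldl (fun d p => d.insert p.1 ((fun (d : PySem.Dict Int Int) (p : Int × Int) => d.getD p.1 0 + p.2) d p)) d := rfl
  rw [h, PySem.Dict.keys_foldl_insert_key]

theorem keys_dictA_aux (result : List (List Int)) (d : PySem.Dict Int Int) :
    (result.foldl (fun d prop => (PySem.List.enumerate prop 0).foldl stepA d) d).keys
      = PySem.Set.update d.keys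
          (result.flatMap (fun prop => (PySem.List.enumerate prop 0).map (·.1))) := by
  induction result generalizing d with
  | nil => simp [PySem.Set.update_nil]
  | cons prop rest ih =>
    rw [List.foldl_cons, ih, stepA_fold_eq, insA_fold_keys]
    rw [List.flatMap_cons, PySem.Set.update_append]

theorem mem_castRange (m n : Nat) : ((n : Nat) : Int) ∈ castRange m ↔ n < m := by
  simp [castRange]

theorem update_castRange (m n : Nat) :
    PySem.Set.update (castRange m) (castRange n) = castRange (max m n) := by
  induction n with
  | zero => simp [castRange, PySem.Set.update_nil]
  | succ n ih =>
    have h1 : castRange (n + 1) = castRange n ++ [(n : Int)] := by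
      simp [castRange, List.range_succ]
    rw [h1, PySem.Set.update_append, ih, PySem.Set.update_cons, PySem.Set.update_nil]
    by_cases hnm : n < m
    · have hmax : max m n = m := by omega
      have hmax1 : max m (n + 1) = m := by omega
      rw [hmax, hmax1, PySem.Set.add_of_mem ((mem_castRange m n).mpr hnm)]
    · have hmax : max m n = n := by omega
      have hmax1 : max m (n + 1) = n + 1 := by omega
      rw [hmax, hmax1, PySem.Set.add_of_not_mem (by rw [mem_castRange]; omega), ← h1]

theorem update_castRange_flat (rs : List (List Int)) (m : Nat) :
    PySem.Set.update (castRange m) (rs.flatMap (fun row => castRange row.length))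
      = castRange (rs.foldl (fun a row => max a row.length) m) := by
  induction rs generalizing m with
  | nil => simp [PySem.Set.update_nil]
  | cons row rest ih =>
    rw [List.flatMap_cons, PySem.Set.update_append, update_castRange, List.foldl_cons, ih]

-- enumerate over the canonical key list pairs each index with itself
theorem enum_castRange (m : Nat) :
    PySem.List.enumerate (castRange m) 0
      = (List.range m).map (fun i : Nat => ((i : Int), (i : Int))) := by
  induction m with
  | zero => simp [castRange, PySem.List.enumerate_nil]
  | succ n ih =>
    have h1 : castRange (n + 1) = castRange n ++ [(n : Int)] := by
      simp [castRange, List.range_succ]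
    rw [h1, PySem.List.enumerate_append, ih]
    have hlen : (castRange n).length = n := by simp [castRange]
    rw [hlen]
    simp [List.range_succ, PySem.List.enumerate_cons, PySem.List.enumerate_nil]

-- an append-if loop is a map
theorem foldl_append_ite {α β : Type} (l : List α) (C : α → Prop) [DecidablePred C]
    (f g : α → β) (init : List β) :
    l.foldl (fun acc x => if C x then acc ++ [f x] else acc ++ [g x]) init
      = init ++ l.map (fun x => if C x then f x else g x) := by
  induction l generalizing init with
  | nil => simp
  | cons x l ih =>
    rw [List.foldl_cons]
    by_cases h : C x
    · rw [if_pos h, ih, List.map_cons, if_pos h, List.append_assoc, List.singleton_append]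
    · rw [if_neg h, ih, List.map_cons, if_neg h, List.append_assoc, List.singleton_append]

-- ===== VERDICT (by name: the statement is the Claim_ definition above) =====
theorem accuracyVerification_spec : Claim_equal_accuracyVerification := by
  intro result actual _hDom _hPre
  unfold Spec_accuracyVerification accuracyVerification accuracyVerification_alt
  simp only []
  set actual0 := actual.headD [] with hact
  have hdict :
      (result.foldl (fun d prop =>
          (PySem.List.enumerate prop 0).foldl (fun d p =>
            if d.getD p.1 0 ≠ 0 then d.insert p.1 (d.getD p.1 0 + p.2)
            else d.insert p.1 p.2) d) PySem.Dict.empty)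
        = result.foldl (fun d prop => (PySem.List.enumerate prop 0).foldl stepA d)
            PySem.Dict.empty := rfl
  rw [hdict]
  set D := result.foldl (fun d prop => (PySem.List.enumerate prop 0).foldl stepA d)
      PySem.Dict.empty with hD
  set M := result.foldl (fun a row => max a row.length) 0 with hM
  have hkeys : D.keys = castRange M := by
    rw [hD, keys_dictA_aux]
    have hperrow : (fun prop => (PySem.List.enumerate prop 0).map (·.1))
        = fun (prop : List Int) => castRange prop.length := by
      funext prop
      rw [PySem.List.map_fst_enumerate]
      simp [castRange, PySem.List.pyRange_one]
      rw [List.map_eq_flatMap]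
    rw [hperrow]
    have hek : (PySem.Dict.empty : PySem.Dict Int Int).keys = castRange 0 := by
      simp [castRange]
    rw [hek, update_castRange_flat]
  rw [hkeys, enum_castRange]
  rw [foldl_append_ite ((List.range M).map (fun i : Nat => ((i : Int), (i : Int))))
        (fun p => D.getD p.2 0 > 4)
        (fun p => PySem.Int.toStr (PySem.List.pyGetD actual0 p.1 0) ++ ",1")
        (fun p => PySem.Int.toStr (PySem.List.pyGetD actual0 p.1 0) ++ ",0") []]
  rw [List.nil_append, List.map_map]
  apply List.map_congr_left
  intro i _hi
  have hval : D.getD ((i : Nat) : Int) 0 = colS result i := by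
    rw [hD, getD_dictA]
    simp
  have hsum : result.foldl (fun s row => if i < row.length then s + row.getD i 0 else s) 0
      = colS result i := rfl
  simp only [Function.comp, hval, hsum, PySem.List.pyGetD_natCast]
  split_ifs <;> rfl
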